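-- pv_equiv track=rewrite | github.com/alcaann/onc2ont | pipelines/spacy_rule_based/relation_extractor.py | select_best_kb_relation
-- ===== SOURCE A (Python) =====
-- from typing import List, Dict, Tuple, Optional, Any, Set, Callable # Added Callable
--
-- KB_SAB_PRIORITY = ['NCI', 'SNOMEDCT_US']
--
-- KB_RELA_PRIORITY = ['metastasis_to', 'disease_has_finding', 'finding_of_disease', 'disease_has_primary_anatomic_site',
--                     'disease_has_associated_morphology', 'may_treat', 'may_be_treated_by', 'causative_agent_of',
--                     'has_finding_site', 'has_assoc_finding', 'associated_with']
--
-- KB_REL_IGNORE = {'RB', 'RN', 'SY', 'RL', 'SUBSET_MEMBER', 'mapped_from', 'mapped_to'}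
--
-- def select_best_kb_relation(kb_relations: List[Dict[str, str]], cui1: str, cui2: str) -> Optional[Dict[str, str]]:
--     # (Keep implementation as before, no client logging needed here)
--     if not kb_relations: return None
--     eligible_relations = [rel for rel in kb_relations if rel.get('rel') not in KB_REL_IGNORE and rel.get('rela') not in KB_REL_IGNORE]
--     if not eligible_relations: return None
--     def get_sort_key(relation):
--         sab = relation.get('sab', ''); rela = relation.get('rela', ''); rel = relation.get('rel', '')
--         sab_priority = KB_SAB_PRIORITY.index(sab) if sab in KB_SAB_PRIORITY else len(KB_SAB_PRIORITY)
--         rela_priority = KB_RELA_PRIORITY.index(rela) if rela in KB_RELA_PRIORITY else (KB_RELA_PRIORITY.index(rel) if rel in KB_RELA_PRIORITY else len(KB_RELA_PRIORITY))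
--         has_rela = 0 if rela else 1 # Prioritize relations with RELA
--         return (sab_priority, rela_priority, has_rela)
--     eligible_relations.sort(key=get_sort_key)
--     return eligible_relations[0]
-- ===== SOURCE B (Python) =====
-- from typing import List, Dict, Optional
--
-- KB_SAB_PRIORITY = ['NCI', 'SNOMEDCT_US']
--
-- KB_RELA_PRIORITY = ['metastasis_to', 'disease_has_finding', 'finding_of_disease', 'disease_has_primary_anatomic_site',
--                     'disease_has_associated_morphology', 'may_treat', 'may_be_treated_by', 'causative_agent_of',
--                     'has_finding_site', 'has_assoc_finding', 'associated_with']
--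
-- KB_REL_IGNORE = {'RB', 'RN', 'SY', 'RL', 'SUBSET_MEMBER', 'mapped_from', 'mapped_to'}
--
-- def _sab_p(r):
--     sab = r.get('sab', '')
--     return KB_SAB_PRIORITY.index(sab) if sab in KB_SAB_PRIORITY else len(KB_SAB_PRIORITY)
--
-- def _rela_p(r):
--     rela = r.get('rela', ''); rel = r.get('rel', '')
--     if rela in KB_RELA_PRIORITY:
--         return KB_RELA_PRIORITY.index(rela)
--     if rel in KB_RELA_PRIORITY:
--         return KB_RELA_PRIORITY.index(rel)
--     return len(KB_RELA_PRIORITY)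
--
-- def _has_rela(r):
--     return 0 if r.get('rela', '') else 1
--
-- def select_best_kb_relation(kb_relations: List[Dict[str, str]], cui1: str, cui2: str) -> Optional[Dict[str, str]]:
--     # successive narrowing passes instead of building a composite sort key and sorting
--     if not kb_relations: return None
--     elig = [r for r in kb_relations if r.get('rel') not in KB_REL_IGNORE and r.get('rela') not in KB_REL_IGNORE]
--     if not elig: return None
--     m1 = min(_sab_p(r) for r in elig)
--     s1 = [r for r in elig if _sab_p(r) == m1]
--     m2 = min(_rela_p(r) for r in s1)
--     s2 = [r for r in s1 if _rela_p(r) == m2]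
--     with_rela = [r for r in s2 if _has_rela(r) == 0]
--     return (with_rela or s2)[0]
-- ===== Notes on version B (the rewrite author's own statement) =====
-- stated objective: alternative
-- what changed: Replaces the composite (sab, rela, has_rela) sort key and stable sort with three successive narrowing filter passes (minimal sab priority, then minimal rela/rel priority, then prefer non-empty rela), returning the first survivor; no tuple key and no sort.
import Mathlib
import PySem

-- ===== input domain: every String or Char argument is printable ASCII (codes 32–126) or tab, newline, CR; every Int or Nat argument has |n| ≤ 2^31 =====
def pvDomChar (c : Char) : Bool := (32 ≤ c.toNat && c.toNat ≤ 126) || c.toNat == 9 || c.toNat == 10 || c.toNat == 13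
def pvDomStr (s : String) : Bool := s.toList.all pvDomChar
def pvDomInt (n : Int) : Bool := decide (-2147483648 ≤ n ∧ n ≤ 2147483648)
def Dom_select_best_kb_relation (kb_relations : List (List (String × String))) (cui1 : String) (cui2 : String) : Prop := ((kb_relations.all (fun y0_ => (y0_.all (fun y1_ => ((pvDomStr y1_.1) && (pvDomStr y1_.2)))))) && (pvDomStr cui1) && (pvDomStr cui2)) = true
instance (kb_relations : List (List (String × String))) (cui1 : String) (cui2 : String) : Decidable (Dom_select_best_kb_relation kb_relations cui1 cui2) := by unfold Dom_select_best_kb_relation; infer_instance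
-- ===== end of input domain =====

-- B replaces composite-key stable sorting by three successive narrowing filter passes (alternative decomposition, same result).
-- Shared module-level constants of the Python file:
def kbSabPriority : List String := ["NCI", "SNOMEDCT_US"]
def kbRelaPriority : List String := ["metastasis_to", "disease_has_finding", "finding_of_disease", "disease_has_primary_anatomic_site",
  "disease_has_associated_morphology", "may_treat", "may_be_treated_by", "causative_agent_of",
  "has_finding_site", "has_assoc_finding", "associated_with"]
def kbRelIgnore : List String := ["RB", "RN", "SY", "RL", "SUBSET_MEMBER", "mapped_from", "mapped_to"]

-- r.get(k) on a dict given as an association list (first-match lookup)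
def pvDictGet (r : List (String × String)) (k : String) : Option String := PySem.Dict.get? (PySem.Dict.mk r) k

-- the shared eligibility test: rel.get('rel') not in KB_REL_IGNORE and rel.get('rela') not in KB_REL_IGNORE
-- (None is never a member of the string set, so a missing key passes)
def pvEligible (r : List (String × String)) : Bool :=
  (match pvDictGet r "rel" with | some s => !(kbRelIgnore.contains s) | none => true) &&
  (match pvDictGet r "rela" with | some s => !(kbRelIgnore.contains s) | none => true)

-- ===== PORT A =====
-- get_sort_key: Python returns the tuple (sab_priority, rela_priority, has_rela), compared lexicographically.
-- Since rela_priority ≤ 11 and has_rela ≤ 1, the Nat encoding a*24 + b*2 + c orders EXACTLY as Python's tuple comparison.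
def pvSortKey (r : List (String × String)) : Nat :=
  let sab := (pvDictGet r "sab").getD ""
  let rela := (pvDictGet r "rela").getD ""
  let rel := (pvDictGet r "rel").getD ""
  let sab_priority := match PySem.List.index? kbSabPriority sab with
    | some i => i | none => kbSabPriority.length
  let rela_priority := match PySem.List.index? kbRelaPriority rela with
    | some i => i
    | none => (match PySem.List.index? kbRelaPriority rel with | some i => i | none => kbRelaPriority.length)
  let has_rela := if rela == "" then 1 else 0   -- 0 if rela else 1
  sab_priority * 24 + rela_priority * 2 + has_rela

def select_best_kb_relation (kb_relations : List (List (String × String))) (cui1 : String) (cui2 : String) : Option (List (String × String)) :=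
  if kb_relations.isEmpty then none
  else
    let eligible_relations := kb_relations.filter pvEligible
    if eligible_relations.isEmpty then none
    else
      -- eligible_relations.sort(key=get_sort_key); return eligible_relations[0]  (list provably nonempty)
      (PySem.List.sorted eligible_relations pvSortKey false).head?

-- ===== PORT B =====
def pvSabP (r : List (String × String)) : Nat :=
  let sab := (pvDictGet r "sab").getD ""
  match PySem.List.index? kbSabPriority sab with
  | some i => i | none => kbSabPriority.length

def pvRelaP (r : List (String × String)) : Nat :=
  let rela := (pvDictGet r "rela").getD ""
  let rel := (pvDictGet r "rel").getD ""
  match PySem.List.index? kbRelaPriority rela with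
  | some i => i
  | none => match PySem.List.index? kbRelaPriority rel with
    | some i => i | none => kbRelaPriority.length

def pvHasRela (r : List (String × String)) : Nat :=
  if (pvDictGet r "rela").getD "" == "" then 1 else 0

def select_best_kb_relation_alt (kb_relations : List (List (String × String))) (cui1 : String) (cui2 : String) : Option (List (String × String)) :=
  if kb_relations.isEmpty then none
  else
    let elig := kb_relations.filter pvEligible
    if elig.isEmpty then none
    else
      -- m1 = min(_sab_p(r) for r in elig)  (min() of a provably nonempty list)
      let m1 := match elig.map pvSabP with | [] => 0 | v :: vs => vs.foldl min v
      let s1 := elig.filter (fun r => pvSabP r == m1)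
      let m2 := match s1.map pvRelaP with | [] => 0 | v :: vs => vs.foldl min v
      let s2 := s1.filter (fun r => pvRelaP r == m2)
      let withRela := s2.filter (fun r => pvHasRela r == 0)
      -- return (with_rela or s2)[0]
      (if withRela.isEmpty then s2 else withRela).head?

-- ===== PRECONDITION & SPEC =====
def Spec_select_best_kb_relation (kb_relations : List (List (String × String))) (cui1 : String) (cui2 : String) (out : Option (List (String × String))) : Prop := out = select_best_kb_relation_alt kb_relations cui1 cui2
instance (kb_relations : List (List (String × String))) (cui1 : String) (cui2 : String) (out : Option (List (String × String))) : Decidable (Spec_select_best_kb_relation kb_relations cui1 cui2 out) := by unfold Spec_select_best_kb_relation; infer_instance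

-- ===== CLAIM (what is proved, stated in full; the proofs are below) =====
def Claim_equal_select_best_kb_relation : Prop := ∀ (kb_relations : List (List (String × String))) (cui1 : String) (cui2 : String), Dom_select_best_kb_relation kb_relations cui1 cui2 → Spec_select_best_kb_relation kb_relations cui1 cui2 (select_best_kb_relation kb_relations cui1 cui2)

-- ===== LEMMAS AND PROOFS =====

-- "keep the leftmost of b,r by smaller key" — the folding step whose left fold over a list
-- yields the FIRST element of minimal key (shared characterisation of both ports' results)
def pvStep {α : Type} (key : α → Nat) (b r : α) : α := if key r < key b then r else b

-- first element of minimal key (none on [])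
def pvFM {α : Type} (key : α → Nat) : List α → Option α
  | [] => none
  | h :: t => some (t.foldl (pvStep key) h)

theorem pvStep_key {α : Type} (key : α → Nat) (b r : α) : key (pvStep key b r) = min (key b) (key r) := by
  unfold pvStep; split_ifs <;> omega

theorem pvFoldl_isMin {α : Type} (key : α → Nat) (t : List α) : ∀ b : α,
    key (t.foldl (pvStep key) b) ≤ key b ∧ ∀ y ∈ t, key (t.foldl (pvStep key) b) ≤ key y := by
  induction t with
  | nil => intro b; simp
  | cons c cs ih =>
    intro b
    have h := ih (pvStep key b c)
    have hk := pvStep_key key b c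
    simp only [List.foldl_cons]
    constructor
    · omega
    · intro y hy
      rcases List.mem_cons.mp hy with rfl | hy
      · omega
      · exact h.2 y hy

theorem pvFoldl_mem {α : Type} (key : α → Nat) (t : List α) : ∀ b : α,
    t.foldl (pvStep key) b = b ∨ t.foldl (pvStep key) b ∈ t := by
  induction t with
  | nil => intro b; simp
  | cons c cs ih =>
    intro b
    simp only [List.foldl_cons]
    rcases ih (pvStep key b c) with h | h
    · rw [h]; unfold pvStep; split_ifs
      · right; exact List.mem_cons_self
      · left; rfl
    · right; exact List.mem_cons_of_mem _ h

theorem pvFoldl_of_min {α : Type} (key : α → Nat) (t : List α) : ∀ b : α,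
    (∀ y ∈ t, key b ≤ key y) → t.foldl (pvStep key) b = b := by
  induction t with
  | nil => intro b _; rfl
  | cons c cs ih =>
    intro b hb
    simp only [List.foldl_cons]
    have hc : pvStep key b c = b := by
      unfold pvStep; split_ifs with h
      · exact absurd (hb c List.mem_cons_self) (by omega)
      · rfl
    rw [hc]
    exact ih b (fun y hy => hb y (List.mem_cons_of_mem _ hy))

theorem pvStep_assoc {α : Type} (key : α → Nat) (b h m : α) :
    pvStep key (pvStep key b h) m = pvStep key b (pvStep key h m) := by
  unfold pvStep; split_ifs <;> first | rfl | omega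

theorem pvFoldl_comm {α : Type} (key : α → Nat) (t : List α) : ∀ b h : α,
    (h :: t).foldl (pvStep key) b = pvStep key b (t.foldl (pvStep key) h) := by
  induction t with
  | nil => intro b h; rfl
  | cons c cs ih =>
    intro b h
    have h1 : (h :: c :: cs).foldl (pvStep key) b = (c :: cs).foldl (pvStep key) (pvStep key b h) := rfl
    rw [h1, ih (pvStep key b h) c, pvStep_assoc]
    have h2 : (c :: cs).foldl (pvStep key) h = pvStep key h ((cs).foldl (pvStep key) c) := ih h c
    rw [h2]

-- head of Python's stable insertion: the new element only reaches the front on a STRICT key decrease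
theorem pvInsertBy_head {α : Type} (key : α → Nat) (x : α) (l : List α) :
    (PySem.List.insertBy (fun a b => decide (key a < key b)) x l).head? =
      some (match l with | [] => x | h :: _ => pvStep key h x) := by
  cases l with
  | nil => rfl
  | cons h t =>
    unfold PySem.List.insertBy pvStep
    by_cases hx : key x < key h
    · simp [hx]
    · simp [hx]

-- the head of the stable sort is the first element of minimal key
theorem pvSorted_head {α : Type} (key : α → Nat) (xs : List α) :
    (PySem.List.sorted xs key false).head? = pvFM key xs := by
  induction xs using List.reverseRecOn with
  | nil => rfl
  | append_singleton t x ih =>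
    rw [PySem.List.sorted_eq_foldl_insertBy, List.foldl_append] at *
    rw [← PySem.List.sorted_eq_foldl_insertBy] at *
    simp only [List.foldl_cons, List.foldl_nil]
    rw [pvInsertBy_head]
    cases hs : PySem.List.sorted t key false with
    | nil =>
      have ht : t = [] := (PySem.List.sorted_eq_nil_iff t key false).mp hs
      subst ht; rfl
    | cons h hs' =>
      rw [hs] at ih
      simp only [List.head?] at ih
      cases t with
      | nil => simp [pvFM] at ih
      | cons t0 ts =>
        simp only [pvFM, Option.some.injEq] at ih
        simp only [List.cons_append, pvFM, Option.some.injEq]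
        rw [List.foldl_append, List.foldl_cons, List.foldl_nil, ← ih]

-- the head of the stable filter to the minimal key K is the first element of minimal key
theorem pvFilter_head {α : Type} (key : α → Nat) (xs : List α) (K : Nat)
    (hlb : ∀ y ∈ xs, K ≤ key y) (hat : ∃ y ∈ xs, key y = K) :
    (xs.filter (fun y => key y == K)).head? = pvFM key xs := by
  induction xs with
  | nil => simp at hat
  | cons h t ih =>
    by_cases hK : key h = K
    · have hb : (key h == K) = true := by simp [hK]
      simp only [List.filter_cons, hb, if_true]
      simp only [pvFM, List.head?_cons, Option.some.injEq]
      exact (pvFoldl_of_min key t h (fun y hy => hK ▸ hlb y (List.mem_cons_of_mem _ hy))).symm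
    · have hKlt : K < key h := lt_of_le_of_ne (hlb h List.mem_cons_self) (fun e => hK e.symm)
      have hat' : ∃ y ∈ t, key y = K := by
        rcases hat with ⟨y, hy, hkey⟩
        rcases List.mem_cons.mp hy with rfl | hy
        · exact absurd hkey hK
        · exact ⟨y, hy, hkey⟩
      have hlb' : ∀ y ∈ t, K ≤ key y := fun y hy => hlb y (List.mem_cons_of_mem _ hy)
      have hfilter : (h :: t).filter (fun y => key y == K) = t.filter (fun y => key y == K) := by
        simp [hK]
      rw [hfilter, ih hlb' hat']
      rcases hat' with ⟨y0, hy0, hy0K⟩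
      cases t with
      | nil => simp at hy0
      | cons h' t' =>
        simp only [pvFM, Option.some.injEq]
        rw [pvFoldl_comm]
        set M := t'.foldl (pvStep key) h' with hM
        have hmin := pvFoldl_isMin key t' h'
        have hMlb : K ≤ key M := by
          rcases pvFoldl_mem key t' h' with he | he
          · rw [← hM] at he; rw [he]; exact hlb' h' List.mem_cons_self
          · exact hlb' M (List.mem_cons_of_mem _ he)
        have hMK : key M = K := by
          have h1 : key M ≤ key y0 := by
            rcases List.mem_cons.mp hy0 with rfl | hy
            · exact (hmin).1
            · exact (hmin).2 y0 hy
          omega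
        unfold pvStep
        rw [if_pos (by omega)]

theorem pvBoolEq {a b : Bool} (h : a = true ↔ b = true) : a = b := by
  cases a <;> cases b <;> simp_all

theorem pvMinSpec {α : Type} (f : α → Nat) (x : α) (xs : List α) :
    (∀ y ∈ x :: xs, (xs.map f).foldl min (f x) ≤ f y) ∧
      ∃ y ∈ x :: xs, f y = (xs.map f).foldl min (f x) := by
  have h1 := PySem.List.foldl_min_le (xs.map f) (f x)
  have h2 := PySem.List.foldl_min_mem (xs.map f) (f x)
  constructor
  · intro y hy
    rcases List.mem_cons.mp hy with rfl | hy
    · exact h1.1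
    · exact h1.2 _ (List.mem_map_of_mem hy)
  · rcases h2 with he | he
    · exact ⟨x, List.mem_cons_self, he.symm⟩
    · rcases List.mem_map.mp he with ⟨y, hy, hfy⟩
      exact ⟨y, List.mem_cons_of_mem _ hy, hfy⟩

theorem pvRelaP_le_aux (s t : String) :
    (match PySem.List.index? kbRelaPriority s with
      | some i => i
      | none => match PySem.List.index? kbRelaPriority t with
        | some i => i | none => kbRelaPriority.length) ≤ 11 := by
  cases h1 : PySem.List.index? kbRelaPriority s with
  | some i =>
    obtain ⟨hk, -⟩ := PySem.List.getElem_of_index?_eq_some h1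
    simp only [kbRelaPriority, List.length] at hk ⊢
    omega
  | none =>
    cases h2 : PySem.List.index? kbRelaPriority t with
    | some i =>
      obtain ⟨hk, -⟩ := PySem.List.getElem_of_index?_eq_some h2
      simp only [kbRelaPriority, List.length] at hk ⊢
      omega
    | none => simp [kbRelaPriority]

theorem pvRelaP_le (r : List (String × String)) : pvRelaP r ≤ 11 :=
  pvRelaP_le_aux ((pvDictGet r "rela").getD "") ((pvDictGet r "rel").getD "")

theorem pvHasRela_le (r : List (String × String)) : pvHasRela r ≤ 1 := by
  unfold pvHasRela; split_ifs <;> omega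

theorem pvKey_split (r : List (String × String)) :
    pvSortKey r = pvSabP r * 24 + pvRelaP r * 2 + pvHasRela r := rfl

-- the heart of the equivalence: on a nonempty list, the head of the stable sort by the
-- composite key equals the result of B's three narrowing passes
theorem pvCore (xs : List (List (String × String))) (hxs : xs ≠ []) :
    (PySem.List.sorted xs pvSortKey false).head? =
      (let m1 := match xs.map pvSabP with | [] => 0 | v :: vs => vs.foldl min v
       let s1 := xs.filter (fun r => pvSabP r == m1)
       let m2 := match s1.map pvRelaP with | [] => 0 | v :: vs => vs.foldl min v
       let s2 := s1.filter (fun r => pvRelaP r == m2)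
       let withRela := s2.filter (fun r => pvHasRela r == 0)
       (if withRela.isEmpty then s2 else withRela).head?) := by
  rcases List.exists_cons_of_ne_nil hxs with ⟨e, es, rfl⟩
  simp only [List.map_cons]
  set m1 := (es.map pvSabP).foldl min (pvSabP e) with hm1
  have h1 := pvMinSpec pvSabP e es
  rw [← hm1] at h1
  set s1 := (e :: es).filter (fun r => pvSabP r == m1) with hs1
  set m2 := (match s1.map pvRelaP with | [] => 0 | v :: vs => vs.foldl min v) with hm2
  have hs1ne : s1 ≠ [] := by
    rcases h1.2 with ⟨y, hy, hyq⟩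
    exact List.ne_nil_of_mem (hs1 ▸ List.mem_filter.mpr ⟨hy, by simp [hyq]⟩)
  rcases List.exists_cons_of_ne_nil hs1ne with ⟨f, fs, hfs⟩
  have h2 : (∀ y ∈ s1, m2 ≤ pvRelaP y) ∧ ∃ y ∈ s1, pvRelaP y = m2 := by
    rw [hm2, hfs]
    simp only [List.map_cons]
    exact pvMinSpec pvRelaP f fs
  have hm2le : m2 ≤ 11 := by
    rcases h2.2 with ⟨y, -, hy⟩
    have := pvRelaP_le y
    omega
  set s2 := s1.filter (fun r => pvRelaP r == m2) with hs2
  set w := s2.filter (fun r => pvHasRela r == 0) with hw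
  have hs1mem : ∀ y, y ∈ s1 ↔ (y ∈ e :: es ∧ pvSabP y = m1) := by
    intro y; rw [hs1]; simp [List.mem_filter]
  have hs2mem : ∀ y, y ∈ s2 ↔ (y ∈ s1 ∧ pvRelaP y = m2) := by
    intro y; rw [hs2]; simp [List.mem_filter]
  by_cases hwE : w.isEmpty
  · -- no survivor has a non-empty 'rela': everyone in s2 has has_rela = 1
    rw [if_pos hwE]
    have h3 : ∀ y ∈ s2, pvHasRela y = 1 := by
      intro y hy
      have hnot := (List.filter_eq_nil_iff.mp (List.isEmpty_iff.mp (hw ▸ hwE))) y hy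
      have := pvHasRela_le y
      simp only [beq_iff_eq] at hnot
      omega
    have hlb : ∀ y ∈ e :: es, m1 * 24 + m2 * 2 + 1 ≤ pvSortKey y := by
      intro y hy
      rw [pvKey_split]
      have hb1 := h1.1 y hy
      have hc3 := pvHasRela_le y
      by_cases e1 : pvSabP y = m1
      · have hys1 : y ∈ s1 := (hs1mem y).mpr ⟨hy, e1⟩
        have hb2 := h2.1 y hys1
        by_cases e2 : pvRelaP y = m2
        · have := h3 y ((hs2mem y).mpr ⟨hys1, e2⟩)
          omega
        · omega
      · omega
    have hat : ∃ y ∈ e :: es, pvSortKey y = m1 * 24 + m2 * 2 + 1 := by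
      rcases h2.2 with ⟨y, hys1, hy2⟩
      have hys2 : y ∈ s2 := (hs2mem y).mpr ⟨hys1, hy2⟩
      have h1y := ((hs1mem y).mp hys1)
      refine ⟨y, h1y.1, ?_⟩
      rw [pvKey_split, h1y.2, hy2, h3 y hys2]
    rw [pvSorted_head, ← pvFilter_head pvSortKey (e :: es) (m1 * 24 + m2 * 2 + 1) hlb hat]
    have hfe : s2 = (e :: es).filter (fun y => pvSortKey y == m1 * 24 + m2 * 2 + 1) := by
      rw [hs2, hs1, List.filter_filter]
      apply List.filter_congr
      intro r hr
      have hb1 := h1.1 r hr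
      have hc2le := pvRelaP_le r
      have hc3 := pvHasRela_le r
      apply pvBoolEq
      simp only [Bool.and_eq_true, beq_iff_eq, pvKey_split]
      by_cases e1 : pvSabP r = m1
      · have hys1 : r ∈ s1 := (hs1mem r).mpr ⟨hr, e1⟩
        have hb2 := h2.1 r hys1
        by_cases e2 : pvRelaP r = m2
        · have := h3 r ((hs2mem r).mpr ⟨hys1, e2⟩)
          omega
        · omega
      · omega
    rw [hfe]
  · -- some survivor has a non-empty 'rela': the result is the with-rela sublist
    rw [if_neg hwE]
    have hwne : w ≠ [] := by
      intro hnil; rw [hnil] at hwE; simp at hwE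
    have hwmem : ∀ y, y ∈ w ↔ (y ∈ s2 ∧ pvHasRela y = 0) := by
      intro y; rw [hw]; simp [List.mem_filter]
    have hlb : ∀ y ∈ e :: es, m1 * 24 + m2 * 2 ≤ pvSortKey y := by
      intro y hy
      rw [pvKey_split]
      have hb1 := h1.1 y hy
      by_cases e1 : pvSabP y = m1
      · have hys1 : y ∈ s1 := (hs1mem y).mpr ⟨hy, e1⟩
        have hb2 := h2.1 y hys1
        omega
      · omega
    have hat : ∃ y ∈ e :: es, pvSortKey y = m1 * 24 + m2 * 2 := by
      rcases List.exists_cons_of_ne_nil hwne with ⟨y, ys, hys⟩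
      have hyw : y ∈ w := by rw [hys]; exact List.mem_cons_self
      rcases (hwmem y).mp hyw with ⟨hys2, hy3⟩
      rcases (hs2mem y).mp hys2 with ⟨hys1, hy2⟩
      have h1y := (hs1mem y).mp hys1
      refine ⟨y, h1y.1, ?_⟩
      rw [pvKey_split, h1y.2, hy2, hy3]
      omega
    rw [pvSorted_head, ← pvFilter_head pvSortKey (e :: es) (m1 * 24 + m2 * 2) hlb hat]
    have hfe : w = (e :: es).filter (fun y => pvSortKey y == m1 * 24 + m2 * 2) := by
      rw [hw, hs2, hs1, List.filter_filter, List.filter_filter]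
      apply List.filter_congr
      intro r hr
      have hb1 := h1.1 r hr
      have hc3 := pvHasRela_le r
      apply pvBoolEq
      simp only [Bool.and_eq_true, beq_iff_eq, pvKey_split]
      by_cases e1 : pvSabP r = m1
      · have hys1 : r ∈ s1 := (hs1mem r).mpr ⟨hr, e1⟩
        have hb2 := h2.1 r hys1
        omega
      · omega
    rw [hfe]


-- ===== VERDICT (by name: the statement is the Claim_ definition above) =====
theorem select_best_kb_relation_spec : Claim_equal_select_best_kb_relation := by
  intro kb_relations cui1 cui2 _
  unfold Spec_select_best_kb_relation select_best_kb_relation select_best_kb_relation_alt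
  by_cases hkb : kb_relations.isEmpty
  · simp [hkb]
  · simp only [hkb, if_false, Bool.false_eq_true]
    by_cases he : (kb_relations.filter pvEligible).isEmpty
    · simp [he]
    · simp only [he, if_false, Bool.false_eq_true]
      exact pvCore (kb_relations.filter pvEligible) (by simpa [List.isEmpty_iff] using he)
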